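-- pv_equiv track=rewrite | github.com/Sosohy/algorithm_study | 프로그래머스/1/131128. 숫자 짝꿍/숫자 짝꿍.py | solution
-- ===== SOURCE A (Python) =====
-- def solution(X, Y):
--     answer = ''
--
--     for i in set(X)&set(Y):
--         tmp = min(X.count(i), Y.count(i))
--         answer += i*tmp
--
--     if(not answer):
--         return "-1"
--     elif(answer.count('0') == len(answer)):
--         return "0"
--     else:
--         answer = ''.join(sorted(answer, reverse=True))
--
--     return answer
-- ===== SOURCE B (Python) =====
-- def solution(X, Y):
--     xs = sorted(X, reverse=True)
--     ys = sorted(Y, reverse=True)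
--     res = []
--     i = j = 0
--     while i < len(xs) and j < len(ys):
--         if xs[i] == ys[j]:
--             res.append(xs[i])
--             i += 1
--             j += 1
--         elif xs[i] > ys[j]:
--             i += 1
--         else:
--             j += 1
--     if not res:
--         return "-1"
--     if all(c == '0' for c in res):
--         return "0"
--     return ''.join(res)
-- ===== Notes on version B (the rewrite author's own statement) =====
-- stated objective: alternative
-- what changed: Replaces the per-distinct-character count scans over set(X)&set(Y) plus a final sort by sorting both strings descending once and doing a two-pointer merge that emits the shared characters already in descending order.
import Mathlib
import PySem

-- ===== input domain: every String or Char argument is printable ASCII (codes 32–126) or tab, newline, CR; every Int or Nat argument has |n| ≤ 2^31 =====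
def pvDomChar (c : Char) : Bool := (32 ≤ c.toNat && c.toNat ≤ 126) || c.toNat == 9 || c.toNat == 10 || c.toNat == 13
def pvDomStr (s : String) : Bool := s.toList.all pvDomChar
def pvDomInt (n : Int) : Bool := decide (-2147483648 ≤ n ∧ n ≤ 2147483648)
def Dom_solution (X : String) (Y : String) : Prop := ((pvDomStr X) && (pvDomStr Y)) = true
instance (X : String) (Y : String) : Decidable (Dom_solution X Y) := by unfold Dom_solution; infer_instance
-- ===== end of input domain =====

-- B sorts both strings descending once and emits the shared characters by a two-pointer merge
-- (already in descending order), instead of A's per-distinct-character count scans plus a final sort.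


-- ===== PORT A =====
def solution (X : String) (Y : String) : String :=
  let xl := X.toList
  let yl := Y.toList
  -- for i in set(X)&set(Y): answer += i * min(X.count(i), Y.count(i))
  let answer : List Char :=
    (PySem.Set.inter (PySem.Set.ofList xl) yl).foldl
      (fun acc i => acc ++ List.replicate (min (xl.count i) (yl.count i)) i) []
  if answer = [] then "-1"
  else if answer.count '0' = answer.length then "0"
  else String.ofList (PySem.List.sorted answer (fun c => c) true)

-- ===== PORT B =====
-- the two-pointer while loop of Source B, as recursion on the two (descending-sorted) lists
def mergeInter : List Char → List Char → List Char
  | [], _ => []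
  | _ :: _, [] => []
  | x :: xs, y :: ys =>
    if x = y then x :: mergeInter xs ys
    else if y < x then mergeInter xs (y :: ys)
    else mergeInter (x :: xs) ys

def solution_alt (X : String) (Y : String) : String :=
  let res := mergeInter (PySem.List.sorted X.toList (fun c => c) true)
                        (PySem.List.sorted Y.toList (fun c => c) true)
  if res = [] then "-1"
  else if res.all (fun c => c == '0') then "0"
  else String.ofList res

-- ===== PRECONDITION & SPEC =====
def Spec_solution (X : String) (Y : String) (out : String) : Prop := out = solution_alt X Y
instance (X : String) (Y : String) (out : String) : Decidable (Spec_solution X Y out) := by unfold Spec_solution; infer_instance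

-- ===== CLAIM (what is proved, stated in full; the proofs are below) =====
def Claim_equal_solution : Prop := ∀ (X : String) (Y : String), Dom_solution X Y → Spec_solution X Y (solution X Y)

-- ===== LEMMAS AND PROOFS =====

-- merge of two descending lists: count of each character is the min of the counts
theorem mergeInter_count (xs ys : List Char)
    (hx : xs.Pairwise (fun a b => b ≤ a)) (hy : ys.Pairwise (fun a b => b ≤ a)) (c : Char) :
    (mergeInter xs ys).count c = min (xs.count c) (ys.count c) := by
  fun_induction mergeInter xs ys with
  | case1 => simp
  | case2 => simp
  | case3 xs x ys ih =>
    have := ih (List.Pairwise.of_cons hx) (List.Pairwise.of_cons hy)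
    by_cases hc : x = c <;> simp [hc, this]
  | case4 x xs y ys hne hlt ih =>
    have hx0 : (y :: ys).count x = 0 := by
      refine List.count_eq_zero.mpr ?_
      intro hmem
      rcases List.mem_cons.mp hmem with h | h
      · exact hne h
      · exact absurd hlt (not_lt.mpr (List.rel_of_pairwise_cons hy h))
    have := ih (List.Pairwise.of_cons hx) hy
    by_cases hc : x = c
    · subst hc
      simp only [this, hx0, List.count_cons_self]
      omega
    · simp [List.count_cons, hc, this]
  | case5 x xs y ys hne hge ih =>
    have hxy : x < y := lt_of_le_of_ne (not_lt.mp hge) hne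
    have hy0 : (x :: xs).count y = 0 := by
      refine List.count_eq_zero.mpr ?_
      intro hmem
      rcases List.mem_cons.mp hmem with h | h
      · exact hne h.symm
      · exact absurd hxy (not_lt.mpr (List.rel_of_pairwise_cons hx h))
    have := ih hx (List.Pairwise.of_cons hy)
    by_cases hc : y = c
    · subst hc
      simp only [this, hy0, List.count_cons_self]
      omega
    · simp [List.count_cons, hc, this]

-- elements of the merge come from the left input
theorem mergeInter_subset_left (xs ys : List Char) : mergeInter xs ys ⊆ xs := by
  fun_induction mergeInter xs ys with
  | case1 => simp
  | case2 => simp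
  | case3 xs x ys ih => exact List.cons_subset_cons x ih
  | case4 x xs y ys hne hlt ih => exact List.Subset.trans ih (List.subset_cons_self x xs)
  | case5 x xs y ys hne hge ih => exact ih

-- merge of two descending lists is descending
theorem mergeInter_pairwise (xs ys : List Char)
    (hx : xs.Pairwise (fun a b => b ≤ a)) (hy : ys.Pairwise (fun a b => b ≤ a)) :
    (mergeInter xs ys).Pairwise (fun a b => b ≤ a) := by
  fun_induction mergeInter xs ys with
  | case1 => simp
  | case2 => simp
  | case3 xs x ys ih =>
    refine List.Pairwise.cons ?_ (ih (List.Pairwise.of_cons hx) (List.Pairwise.of_cons hy))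
    intro z hz
    exact List.rel_of_pairwise_cons hx (mergeInter_subset_left _ _ hz)
  | case4 x xs y ys hne hlt ih => exact ih (List.Pairwise.of_cons hx) hy
  | case5 x xs y ys hne hge ih => exact ih hx (List.Pairwise.of_cons hy)

-- count of a character in a flatMap of replicates over a duplicate-free index list
theorem count_flatMap_replicate (l : List Char) (m : Char → Nat) (c : Char) (hn : l.Nodup) :
    (l.flatMap (fun i => List.replicate (m i) i)).count c = if c ∈ l then m c else 0 := by
  induction l with
  | nil => simp
  | cons i l ih =>
    rw [List.flatMap_cons, List.count_append, ih hn.of_cons]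
    by_cases hc : c = i
    · subst hc
      simp [(List.nodup_cons.mp hn).1]
    · simp [List.count_replicate, hc, Ne.symm hc]

-- A's accumulated answer has count = min of the counts, for every character
theorem answer_count (xl yl : List Char) (c : Char) :
    ((PySem.Set.inter (PySem.Set.ofList xl) yl).foldl
      (fun acc i => acc ++ List.replicate (min (xl.count i) (yl.count i)) i) []).count c
      = min (xl.count c) (yl.count c) := by
  rw [PySem.List.foldl_append_eq_flatMap, List.nil_append]
  have hnd : (PySem.Set.inter (PySem.Set.ofList xl) yl).Nodup :=
    PySem.Set.nodup_inter _ _ (PySem.Set.nodup_ofList _)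
  have hmem : ∀ d, d ∈ PySem.Set.inter (PySem.Set.ofList xl) yl ↔ d ∈ xl ∧ d ∈ yl := by
    intro d
    rw [PySem.Set.mem_inter, PySem.Set.mem_ofList]
  rw [count_flatMap_replicate _ _ _ hnd]
  by_cases hc : c ∈ PySem.Set.inter (PySem.Set.ofList xl) yl
  · simp [hc]
  · rw [if_neg hc]
    rcases not_and_or.mp ((hmem c).not.mp hc) with h | h
    · rw [List.count_eq_zero_of_not_mem h]
      omega
    · rw [List.count_eq_zero_of_not_mem h]
      omega

theorem solution_spec : Claim_equal_solution := by
  intro X Y _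
  unfold Spec_solution solution solution_alt
  set xl := X.toList with hxl
  set yl := Y.toList with hyl
  set answer : List Char :=
    (PySem.Set.inter (PySem.Set.ofList xl) yl).foldl
      (fun acc i => acc ++ List.replicate (min (xl.count i) (yl.count i)) i) [] with hans
  set res : List Char := mergeInter (PySem.List.sorted xl (fun c => c) true)
      (PySem.List.sorted yl (fun c => c) true) with hres
  have hrescnt : ∀ c, res.count c = min (xl.count c) (yl.count c) := by
    intro c
    rw [hres, mergeInter_count _ _ (PySem.List.sorted_pairwise_rev ..) (PySem.List.sorted_pairwise_rev ..)]
    rw [(PySem.List.sorted_perm xl (fun c => c) true).count_eq, (PySem.List.sorted_perm yl (fun c => c) true).count_eq]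
  have hperm : List.Perm answer res := by
    refine List.perm_iff_count.mpr ?_
    intro c
    rw [hrescnt c, hans, answer_count]
  have hlen : answer.length = res.length := hperm.length_eq
  have he1 : (answer = []) ↔ (res = []) := by
    rw [← List.length_eq_zero_iff, ← List.length_eq_zero_iff, hlen]
  have he2 : (answer.count '0' = answer.length) ↔ (res.all (fun c => c == '0') = true) := by
    rw [hperm.count_eq, hlen, List.count_eq_length, List.all_eq_true]
    constructor
    · intro h c hc
      exact beq_iff_eq.mpr (h c hc).symm
    · intro h c hc
      exact (beq_iff_eq.mp (h c hc)).symm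
  by_cases h1 : answer = []
  · rw [if_pos h1, if_pos (he1.mp h1)]
  · rw [if_neg h1, if_neg (he1.not.mp h1)]
    by_cases h2 : answer.count '0' = answer.length
    · rw [if_pos h2, if_pos (he2.mp h2)]
    · rw [if_neg h2, if_neg (he2.not.mp h2)]
      congr 1
      refine (PySem.List.sorted_perm answer (fun c => c) true |>.trans hperm).eq_of_pairwise
        (fun a b _ _ hab hba => le_antisymm hba hab) (PySem.List.sorted_pairwise_rev ..) ?_
      exact mergeInter_pairwise _ _ (PySem.List.sorted_pairwise_rev ..) (PySem.List.sorted_pairwise_rev ..)
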